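-- pv_equiv track=rewrite | github.com/Matteo-Candi/Master-Thesis | results/test_01/test_01_formatted.py | isDivisibleByDivisor
-- ===== SOURCE A (Python) =====
-- def isDivisibleByDivisor(s, d):
--     s %= d
--     hashSet = set()
--     hashSet.add(s)
--     for i in range(d):
--         s += s % d
--         s %= d
--         if s in hashSet:
--             if s == 0:
--                 return "Yes"
--             return "No"
--         else:
--             hashSet.add(s)
--     return "Yes"
-- ===== SOURCE B (Python) =====
-- def isDivisibleByDivisor(s, d):
--     while d != 0 and d % 2 == 0:
--         d //= 2
--     return "Yes" if s % d == 0 else "No"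
-- ===== Notes on version B (the rewrite author's own statement) =====
-- stated objective: faster
-- what changed: Replaces the O(d) cycle-detecting loop over doubled residues with a set by stripping the factors of 2 from d and doing one divisibility test by its odd part.
-- outside the precondition, e.g. on isDivisibleByDivisor(1, -3): A returns 'Yes', B returns 'No'; on isDivisibleByDivisor(5, 0): A raises ZeroDivisionError, B raises ZeroDivisionError
import Mathlib
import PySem

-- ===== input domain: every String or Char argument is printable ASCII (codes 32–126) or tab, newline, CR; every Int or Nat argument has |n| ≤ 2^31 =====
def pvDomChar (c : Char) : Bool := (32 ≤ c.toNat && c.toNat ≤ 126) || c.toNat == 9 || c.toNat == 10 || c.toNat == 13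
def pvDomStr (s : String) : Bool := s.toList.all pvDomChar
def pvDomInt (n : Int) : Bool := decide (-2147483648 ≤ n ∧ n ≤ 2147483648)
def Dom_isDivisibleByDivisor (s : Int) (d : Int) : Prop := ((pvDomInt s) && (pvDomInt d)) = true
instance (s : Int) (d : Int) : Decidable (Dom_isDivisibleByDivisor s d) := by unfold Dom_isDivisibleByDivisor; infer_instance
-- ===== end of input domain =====

-- B strips the factors of 2 from d and tests divisibility by the odd part (O(log d))
-- instead of A's O(d) doubling loop with a seen-set: faster (asymptotic).

-- ===== PORT A =====
-- the for-loop with early return: 'for i in range(d)' runs d.toNat times (i unused),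
-- carrying (s, hashSet); counting down the remaining iterations
def pvGoA (d : Int) : Nat → Int → PySem.Set Int → String
  | 0, _, _ => "Yes"
  | n + 1, s, hs =>
    let s' := PySem.Int.mod (s + PySem.Int.mod s d) d
    if PySem.Set.contains hs s' then
      if s' = 0 then "Yes" else "No"
    else pvGoA d n s' (PySem.Set.add hs s')

def isDivisibleByDivisor (s : Int) (d : Int) : String :=
  let s0 := PySem.Int.mod s d
  pvGoA d d.toNat s0 (PySem.Set.add PySem.Set.empty s0)

-- ===== PORT B =====
-- 'while d != 0 and d % 2 == 0: d //= 2'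
def pvStripTwos (d : Int) : Int :=
  if h : d ≠ 0 ∧ PySem.Int.mod d 2 = 0 then pvStripTwos (PySem.Int.floordiv d 2) else d
termination_by d.natAbs
decreasing_by
  obtain ⟨hd0, hdvd⟩ := h
  obtain ⟨c, hc⟩ := (PySem.Int.mod_eq_zero_iff_dvd d 2).1 hdvd
  have h2 : PySem.Int.floordiv d 2 = c := by
    rw [PySem.Int.floordiv_eq_ediv_of_pos (by omega), hc]
    omega
  rw [h2]
  have : c ≠ 0 := by rintro rfl; simp at hc; exact hd0 hc
  simp [hc, Int.natAbs_mul]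
  omega

def isDivisibleByDivisor_alt (s : Int) (d : Int) : String :=
  if PySem.Int.mod s (pvStripTwos d) = 0 then "Yes" else "No"

-- ===== PRECONDITION & SPEC =====
-- Pre_ excludes d = 0, where A raises ZeroDivisionError, and d < 0, which is outside the
-- natural domain of a divisor test (A's 'for i in range(d)' is empty there, so A returns
-- "Yes" unconditionally regardless of s).
def Pre_isDivisibleByDivisor (s : Int) (d : Int) : Prop := 0 < d
instance (s : Int) (d : Int) : Decidable (Pre_isDivisibleByDivisor s d) := by unfold Pre_isDivisibleByDivisor; infer_instance

def pvWitness_isDivisibleByDivisor : Int × Int := (6, 4)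

def Spec_isDivisibleByDivisor (s : Int) (d : Int) (out : String) : Prop := out = isDivisibleByDivisor_alt s d
instance (s : Int) (d : Int) (out : String) : Decidable (Spec_isDivisibleByDivisor s d out) := by unfold Spec_isDivisibleByDivisor; infer_instance

-- ===== CLAIM (what is proved, stated in full; the proofs are below) =====
def Claim_equal_isDivisibleByDivisor : Prop := ∀ (s : Int) (d : Int), Dom_isDivisibleByDivisor s d → Pre_isDivisibleByDivisor s d → Spec_isDivisibleByDivisor s d (isDivisibleByDivisor s d)

-- ===== LEMMAS AND PROOFS =====

-- the loop's state update, and its iterates (the doubling orbit of s mod d)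
def pvStep (d x : Int) : Int := PySem.Int.mod (x + PySem.Int.mod x d) d

def pvOrbit (d x : Int) : Nat → Int
  | 0 => x
  | k + 1 => pvStep d (pvOrbit d x k)

theorem pvOrbit_shift (d x : Int) (a b : Nat) :
    pvOrbit d (pvOrbit d x a) b = pvOrbit d x (a + b) := by
  induction b with
  | zero => rfl
  | succ b ih => simp [pvOrbit, ih]

-- before the orbit first reaches 0 its values are pairwise distinct
theorem pvOrbit_distinct (d x : Int) (K : Nat) (hK : pvOrbit d x K = 0)
    (hmin : ∀ j < K, pvOrbit d x j ≠ 0) {i j : Nat} (hij : i < j) (hjK : j ≤ K) :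
    pvOrbit d x i ≠ pvOrbit d x j := by
  intro heq
  have h1 : pvOrbit d x (i + (K - j)) = pvOrbit d x (j + (K - j)) := by
    rw [← pvOrbit_shift, ← pvOrbit_shift, heq]
  have h2 : j + (K - j) = K := by omega
  rw [h2, hK] at h1
  exact hmin (i + (K - j)) (by omega) h1

theorem pvStep_zero (d : Int) : pvStep d 0 = 0 := by
  simp [pvStep, PySem.Int.mod]

theorem pvGoA_yes_zero (d : Int) (n : Nat) (hs : PySem.Set Int)
    (h0 : 0 ∈ hs) : pvGoA d (n + 1) 0 hs = "Yes" := by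
  rw [show pvGoA d (n + 1) 0 hs =
      (if PySem.Set.contains hs (pvStep d 0) then
        (if pvStep d 0 = 0 then "Yes" else "No")
      else pvGoA d n (pvStep d 0) (PySem.Set.add hs (pvStep d 0))) from rfl,
    pvStep_zero, (PySem.Set.contains_iff _ _).2 h0]
  simp

-- yes case: the orbit reaches 0 first (at step K ≥ 1), the loop returns "Yes"
theorem pvGoA_yes (d : Int) : ∀ (K : Nat), 0 < K → ∀ (x : Int) (hs : PySem.Set Int) (n : Nat),
    pvOrbit d x K = 0 → (∀ j < K, pvOrbit d x j ≠ 0) →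
    (∀ y ∈ hs, ∀ j, 1 ≤ j → j ≤ K → y ≠ pvOrbit d x j) →
    K < n → pvGoA d n x hs = "Yes" := by
  intro K
  induction K with
  | zero => omega
  | succ K ih =>
    intro _ x hs n hK hmin hhs hlen
    match n with
    | 0 => omega
    | n + 1 =>
      have hx1 : pvStep d x = pvOrbit d x 1 := rfl
      have hnot : pvStep d x ∉ hs := by
        intro hmem
        exact hhs _ hmem 1 le_rfl (by omega) hx1
      have hcont : PySem.Set.contains hs (pvStep d x) = false := by
        rcases h : PySem.Set.contains hs (pvStep d x) with _ | _
        · rfl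
        · exact absurd ((PySem.Set.contains_iff _ _).1 h) hnot
      show pvGoA d (n + 1) x hs = "Yes"
      rcases Nat.eq_zero_or_pos K with hK0 | hKpos
      · -- K + 1 = 1 : the next value is 0, gets added, and is detected one step later
        subst hK0
        have hs0 : pvStep d x = 0 := hK
        rw [show pvGoA d (n + 1) x hs =
            (if PySem.Set.contains hs (pvStep d x) then
              (if pvStep d x = 0 then "Yes" else "No")
            else pvGoA d n (pvStep d x) (PySem.Set.add hs (pvStep d x))) from rfl]
        rw [hcont]
        simp only [Bool.false_eq_true, if_false]
        match n, hlen with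
        | n + 1, _ =>
          rw [hs0]
          exact pvGoA_yes_zero d n _ ((PySem.Set.mem_add _ _ _).2 (Or.inr rfl))
      · -- K + 1 ≥ 2 : the next value is fresh and nonzero, recurse
        have hx1ne : pvStep d x ≠ 0 := by rw [hx1]; exact hmin 1 (by omega)
        rw [show pvGoA d (n + 1) x hs =
            (if PySem.Set.contains hs (pvStep d x) then
              (if pvStep d x = 0 then "Yes" else "No")
            else pvGoA d n (pvStep d x) (PySem.Set.add hs (pvStep d x))) from rfl]
        rw [hcont]
        simp only [Bool.false_eq_true, if_false]
        apply ih hKpos (pvStep d x) _ n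
        · rw [hx1, pvOrbit_shift, Nat.add_comm]; exact hK
        · intro j hj
          rw [hx1, pvOrbit_shift]
          exact hmin (1 + j) (by omega)
        · intro y hy j hj1 hjK
          rw [hx1, pvOrbit_shift]
          rcases (PySem.Set.mem_add _ _ _).1 hy with hyy | hyy
          · exact hhs y hyy (1 + j) (by omega) (by omega)
          · subst hyy
            rw [hx1]
            exact pvOrbit_distinct d x (K + 1) hK hmin (by omega) (by omega)
        · omega
  
-- no case: the orbit never reaches 0; by pigeonhole a repeat (nonzero) is detected
theorem pvGoA_no (d : Int) (hd : 0 < d) : ∀ (n : Nat) (x : Int) (hs : PySem.Set Int),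
    (∀ j, pvOrbit d x j ≠ 0) → (∀ y ∈ hs, 1 ≤ y ∧ y < d) → hs.Nodup →
    d ≤ n + hs.length → pvGoA d n x hs = "No" := by
  intro n
  induction n with
  | zero =>
    intro x hs _ hbd hnd hlen
    exfalso
    have hsub : hs.toFinset ⊆ Finset.Ico (1 : Int) d := by
      intro y hy
      rw [List.mem_toFinset] at hy
      exact Finset.mem_Ico.2 (hbd y hy)
    have hcard := Finset.card_le_card hsub
    rw [List.toFinset_card_of_nodup hnd, Int.card_Ico] at hcard
    simp at hlen
    omega
  | succ n ih =>
    intro x hs horb hbd hnd hlen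
    have hx1 : pvStep d x = pvOrbit d x 1 := rfl
    have hne : pvStep d x ≠ 0 := by rw [hx1]; exact horb 1
    have hlo : 0 ≤ pvStep d x := PySem.Int.mod_nonneg _ hd
    have hhi : pvStep d x < d := PySem.Int.mod_lt _ hd
    rw [show pvGoA d (n + 1) x hs =
        (if PySem.Set.contains hs (pvStep d x) then
          (if pvStep d x = 0 then "Yes" else "No")
        else pvGoA d n (pvStep d x) (PySem.Set.add hs (pvStep d x))) from rfl]
    rcases h : PySem.Set.contains hs (pvStep d x) with _ | _
    · simp only [Bool.false_eq_true, if_false]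
      have hnotmem : pvStep d x ∉ hs := fun hm => by
        have hc := (PySem.Set.contains_iff _ _).2 hm
        rw [h] at hc
        exact Bool.noConfusion hc
      rw [PySem.Set.add_of_not_mem hnotmem]
      apply ih
      · intro j
        rw [hx1, pvOrbit_shift]
        exact horb (1 + j)
      · intro y hy
        rcases List.mem_append.1 hy with hyy | hyy
        · exact hbd y hyy
        · simp at hyy; subst hyy; omega
      · exact List.Nodup.append hnd (List.nodup_singleton _)
          (by simpa [List.disjoint_singleton] using hnotmem)
      · simp at hlen ⊢; omega
    · simp only [if_true, if_neg hne]

-- the orbit of s % d is the doubling orbit: pvOrbit d (s % d) j = (2^j * s) % d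
theorem pvOrbit_formula (d : Int) (hd : 0 < d) (s : Int) :
    ∀ j, pvOrbit d (PySem.Int.mod s d) j = PySem.Int.mod (2 ^ j * s) d := by
  have hm : ∀ a : Int, PySem.Int.mod a d = a % d := fun a => PySem.Int.mod_eq_emod_of_pos hd
  intro j
  induction j with
  | zero => simp [pvOrbit, hm]
  | succ j ih =>
    show pvStep d (pvOrbit d (PySem.Int.mod s d) j) = _
    rw [ih]
    simp only [pvStep, hm]
    rw [Int.emod_emod_of_dvd _ (dvd_refl d)]
    have h1 : 2 ^ j * s % d + 2 ^ j * s % d = 2 * (2 ^ j * s % d) := by ring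
    rw [h1]
    conv_lhs => rw [Int.mul_emod, Int.emod_emod_of_dvd _ (dvd_refl d), ← Int.mul_emod]
    ring_nf

-- pvStripTwos d is the odd part of d: d = 2^v * pvStripTwos d with pvStripTwos d odd
theorem pvStripTwos_spec : ∀ d : Int, ∃ v : Nat, d = 2 ^ v * pvStripTwos d ∧ (d ≠ 0 → ¬ (2 ∣ pvStripTwos d)) := by
  intro d
  induction d using pvStripTwos.induct with
  | case1 d h ih =>
    obtain ⟨hd0, hdvd⟩ := h
    obtain ⟨c, hc⟩ := (PySem.Int.mod_eq_zero_iff_dvd d 2).1 hdvd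
    have h2 : PySem.Int.floordiv d 2 = c := by
      rw [PySem.Int.floordiv_eq_ediv_of_pos (by omega : (0:Int) < 2), hc]; omega
    have hstrip : pvStripTwos d = pvStripTwos c := by
      rw [pvStripTwos, dif_pos ⟨hd0, hdvd⟩, h2]
    rw [h2] at ih
    obtain ⟨v, hv, hoddc⟩ := ih
    have hc0 : c ≠ 0 := by rintro rfl; exact hd0 (by omega)
    refine ⟨v + 1, ?_, fun _ => ?_⟩
    · rw [hstrip, hc]
      linear_combination 2 * hv
    · rw [hstrip]
      exact hoddc hc0
  | case2 d h =>
    have hstrip : pvStripTwos d = d := by rw [pvStripTwos, dif_neg h]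
    refine ⟨0, by rw [hstrip]; ring, ?_⟩
    intro hd0 hdvd
    rw [hstrip] at hdvd
    exact h ⟨hd0, (PySem.Int.mod_eq_zero_iff_dvd d 2).2 hdvd⟩

-- ===== VERDICT (by name: the statement is the Claim_ definition above) =====
theorem isDivisibleByDivisor_spec : Claim_equal_isDivisibleByDivisor := by
  intro s d _ hd
  have hd : (0 : Int) < d := hd
  obtain ⟨v, hdv, hodd'⟩ := pvStripTwos_spec d
  set m := pvStripTwos d with hm
  have hd0 : d ≠ 0 := by omega
  have hodd : ¬ (2 ∣ m) := hodd' hd0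
  have hmpos : 0 < m := by
    by_contra hneg
    rw [not_lt] at hneg
    have h2 : (0:Int) < 2 ^ v := by positivity
    nlinarith
  have hmd : m ∣ d := ⟨2 ^ v, by rw [hdv]; ring⟩
  unfold Spec_isDivisibleByDivisor isDivisibleByDivisor isDivisibleByDivisor_alt
  rw [← hm]
  by_cases hms : m ∣ s
  · -- B says "Yes"; A's orbit reaches 0 first
    rw [if_pos ((PySem.Int.mod_eq_zero_iff_dvd s m).2 hms)]
    have hreach : pvOrbit d (PySem.Int.mod s d) v = 0 := by
      rw [pvOrbit_formula d hd s v]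
      apply (PySem.Int.mod_eq_zero_iff_dvd _ _).2
      obtain ⟨c, hc⟩ := hms
      exact ⟨c, by rw [hdv, hc]; ring⟩
    have hex : ∃ k, pvOrbit d (PySem.Int.mod s d) k = 0 := ⟨v, hreach⟩
    set K := Nat.find hex with hK
    have hKzero : pvOrbit d (PySem.Int.mod s d) K = 0 := Nat.find_spec hex
    have hKmin : ∀ j < K, pvOrbit d (PySem.Int.mod s d) j ≠ 0 := fun j hj => Nat.find_min hex hj
    rcases Nat.eq_zero_or_pos K with hK0 | hKpos
    · -- s % d = 0 : detected immediately
      have hs0 : PySem.Int.mod s d = 0 := by rw [← hKzero, hK0]; rfl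
      rw [hs0]
      obtain ⟨n, hn⟩ : ∃ n, d.toNat = n + 1 := ⟨d.toNat - 1, by omega⟩
      rw [hn]
      exact pvGoA_yes_zero d n _ ((PySem.Set.mem_add _ _ _).2 (Or.inr rfl))
    · have hKled : K < d.toNat := by
        have hKv : K ≤ v := Nat.find_min' hex hreach
        have h2v : (2:Int) ^ v ≤ d := by nlinarith [pow_pos (show (0:Int) < 2 by norm_num) v]
        have hv2 : (v:Int) < 2 ^ v := by
          have := Nat.lt_two_pow_self (n := v)
          exact_mod_cast this
        omega
      apply pvGoA_yes d K hKpos _ _ _ hKzero hKmin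
      · intro y hy j hj1 hjK
        rcases (PySem.Set.mem_add _ _ _).1 hy with hyy | hyy
        · simp [PySem.Set.empty] at hyy
        · subst hyy
          exact pvOrbit_distinct d _ K hKzero hKmin (i := 0) (j := j) (by omega) hjK
      · omega
  · -- B says "No"; A's orbit never reaches 0
    rw [if_neg (fun h => hms ((PySem.Int.mod_eq_zero_iff_dvd s m).1 h))]
    have horb : ∀ j, pvOrbit d (PySem.Int.mod s d) j ≠ 0 := by
      intro j hj
      rw [pvOrbit_formula d hd s j] at hj
      have hdd : d ∣ 2 ^ j * s := (PySem.Int.mod_eq_zero_iff_dvd _ _).1 hj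
      have hmm : m ∣ 2 ^ j * s := dvd_trans hmd hdd
      have hcop2 : IsCoprime m 2 := by
        rw [Int.isCoprime_iff_gcd_eq_one]
        have hg2 : Int.gcd m 2 ∣ 2 := by simpa using Int.gcd_dvd_natAbs_right m 2
        have hgm : (Int.gcd m 2 : Int) ∣ m := Int.gcd_dvd_left m 2
        rcases (Nat.dvd_prime Nat.prime_two).1 hg2 with h1 | h1
        · exact h1
        · exfalso; rw [h1] at hgm; exact hodd (by exact_mod_cast hgm)
      have hcop : IsCoprime m (2 ^ j) := hcop2.pow_right
      exact hms (hcop.dvd_of_dvd_mul_left hmm)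
    have hs0ne : PySem.Int.mod s d ≠ 0 := horb 0
    have hs0lo : 0 ≤ PySem.Int.mod s d := PySem.Int.mod_nonneg _ hd
    have hs0hi : PySem.Int.mod s d < d := PySem.Int.mod_lt _ hd
    apply pvGoA_no d hd _ _ _ horb
    · intro y hy
      rcases (PySem.Set.mem_add _ _ _).1 hy with hyy | hyy
      · simp [PySem.Set.empty] at hyy
      · subst hyy; omega
    · have : PySem.Set.add PySem.Set.empty (PySem.Int.mod s d) = [PySem.Int.mod s d] := by
        rfl
      rw [this]; exact List.nodup_singleton _
    · have : (PySem.Set.add PySem.Set.empty (PySem.Int.mod s d)).length = 1 := rfl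
      omega
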